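-- pv_equiv track=rewrite | github.com/AxelGard/homeradar | data/getdata.py | cluster_data
-- ===== SOURCE A (Python) =====
-- def cluster_data(cards):
--     cards_data = []
--     card = []
--     for c in cards:
--         if '<div class="object-card__header">' in str(c):
--             continue
--         if "<h3" in str(c):
--             cards_data.append(card)
--             card = []
--         card.append(str(c))
--     return cards_data
-- ===== SOURCE B (Python) =====
-- HEADER = '<div class="object-card__header">'
--
-- def cluster_data(cards):
--     strs = [str(c) for c in cards if HEADER not in str(c)]
--     idx = [i for i, s in enumerate(strs) if "<h3" in s]
--     return [strs[s:e] for s, e in zip([0] + idx[:-1], idx)]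
-- ===== Notes on version B (the rewrite author's own statement) =====
-- stated objective: alternative
-- what changed: A builds groups with a stateful loop (current-card accumulator flushed at each '<h3' marker); B instead filters the header cards once, collects the marker positions, and produces each group by slicing between consecutive marker boundaries (dropping the tail after the last marker, as A does).
import Mathlib
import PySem

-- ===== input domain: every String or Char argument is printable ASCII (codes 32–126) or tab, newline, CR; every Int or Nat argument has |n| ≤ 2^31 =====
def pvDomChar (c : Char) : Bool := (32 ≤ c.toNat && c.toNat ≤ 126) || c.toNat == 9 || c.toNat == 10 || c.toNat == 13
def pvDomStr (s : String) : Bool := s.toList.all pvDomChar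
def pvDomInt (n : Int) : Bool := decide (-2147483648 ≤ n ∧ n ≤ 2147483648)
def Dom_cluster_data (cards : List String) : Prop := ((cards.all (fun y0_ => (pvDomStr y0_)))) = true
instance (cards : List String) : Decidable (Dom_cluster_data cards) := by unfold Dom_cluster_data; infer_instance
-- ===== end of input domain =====

-- B replaces A's stateful flush-on-marker loop by filter + marker positions + slicing between
-- consecutive boundaries (alternative decomposition, same cost).


def pvHeader : String := "<div class=\"object-card__header\">"

-- ===== PORT A =====
-- str(c) on a str is the identity, so it is ported as c itself.
def cluster_data (cards : List String) : List (List String) :=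
  (cards.foldl
    (fun (st : List (List String) × List String) c =>
      if PySem.Str.isIn pvHeader c then st
      else
        let st2 := if PySem.Str.isIn "<h3" c then (st.1 ++ [st.2], ([] : List String)) else st
        (st2.1, st2.2 ++ [c]))
    ([], [])).1

-- ===== PORT B =====
def cluster_data_alt (cards : List String) : List (List String) :=
  let strs := cards.filter (fun c => !PySem.Str.isIn pvHeader c)
  let idx : List Int :=
    (PySem.List.enumerate strs).filterMap
      (fun p => if PySem.Str.isIn "<h3" p.2 then some p.1 else none)
  (List.zip ((0 : Int) :: idx.dropLast) idx).map
    (fun p => PySem.List.slice strs (some p.1) (some p.2))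

-- ===== PRECONDITION & SPEC =====
def Spec_cluster_data (cards : List String) (out : List (List String)) : Prop := out = cluster_data_alt cards
instance (cards : List String) (out : List (List String)) : Decidable (Spec_cluster_data cards out) := by unfold Spec_cluster_data; infer_instance

-- ===== CLAIM (what is proved, stated in full; the proofs are below) =====
def Claim_equal_cluster_data : Prop := ∀ (cards : List String), Dom_cluster_data cards → Spec_cluster_data cards (cluster_data cards)

-- ===== LEMMAS AND PROOFS =====

-- marker positions of the (already header-filtered) string list
def pvIdx (l : List String) : List Int :=
  (PySem.List.enumerate l).filterMap
    (fun p => if PySem.Str.isIn "<h3" p.2 then some p.1 else none)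

-- the groups B produces from a (already header-filtered) string list
def pvCore (l : List String) : List (List String) :=
  (List.zip ((0 : Int) :: (pvIdx l).dropLast) (pvIdx l)).map
    (fun p => PySem.List.slice l (some p.1) (some p.2))

lemma mem_pvIdx {l : List String} {i : Int} (h : i ∈ pvIdx l) :
    ∃ k : Nat, i = (k : Int) ∧ k < l.length := by
  unfold pvIdx at h
  rw [List.mem_filterMap] at h
  obtain ⟨p, hp, hf⟩ := h
  rw [PySem.List.mem_enumerate_iff] at hp
  obtain ⟨k, hk, rfl⟩ := hp
  refine ⟨k, ?_, hk⟩
  by_cases hc : PySem.Str.isIn "<h3" (l[k]) <;> simp at hf <;> omega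

lemma pvIdx_append (l : List String) (s : String) :
    pvIdx (l ++ [s]) =
      pvIdx l ++ (if PySem.Str.isIn "<h3" s then [(l.length : Int)] else []) := by
  unfold pvIdx
  rw [PySem.List.enumerate_append, List.filterMap_append]
  congr 1
  simp only [PySem.List.enumerate_cons, PySem.List.enumerate_nil, List.filterMap_cons,
    List.filterMap_nil]
  by_cases hc : PySem.Chars.isIn ['<', 'h', '3'] s.toList = true <;> simp [hc]

lemma slice_append_eq (l : List String) (s : String) (j k : Nat) (hk : k ≤ l.length) :
    PySem.List.slice (l ++ [s]) (some (j : Int)) (some (k : Int)) =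
      PySem.List.slice l (some (j : Int)) (some (k : Int)) := by
  rw [PySem.List.slice_natCast, PySem.List.slice_natCast]
  rcases Nat.le_total j k with hj | hj
  · rw [List.drop_append_of_le_length (by omega),
      List.take_append_of_le_length (by rw [List.length_drop]; omega)]
  · rw [Nat.sub_eq_zero_of_le hj]; simp

lemma zip_cons_concat {α : Type} (x n : α) (xs : List α) :
    List.zip (x :: xs) (xs ++ [n]) =
      List.zip (x :: xs.dropLast) xs ++ [(xs.getLastD x, n)] := by
  induction xs generalizing x with
  | nil => simp
  | cons y ys ih =>
    cases ys with
    | nil => simp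
    | cons z zs =>
      simp only [List.cons_append, List.zip_cons_cons] at *
      rw [ih y]
      simp [List.dropLast_cons_of_ne_nil, List.getLast?_eq_some_getLast]

lemma pvIdx_getLastD (l : List String) :
    ∃ k : Nat, (pvIdx l).getLastD 0 = (k : Int) ∧ k ≤ l.length := by
  cases h : pvIdx l with
  | nil => exact ⟨0, rfl, by omega⟩
  | cons a as =>
    have hmem : (pvIdx l).getLastD 0 ∈ pvIdx l := by
      rw [h]
      simp only [List.getLastD_eq_getLast?,
        List.getLast?_eq_some_getLast (l := a :: as) (by simp), Option.getD_some]
      exact List.getLast_mem (by simp)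
    obtain ⟨k, hk, hlt⟩ := mem_pvIdx hmem
    rw [h] at hk
    exact ⟨k, hk, by omega⟩

lemma pvCore_append (l : List String) (s : String) :
    (List.zip ((0 : Int) :: (pvIdx l).dropLast) (pvIdx l)).map
      (fun p => PySem.List.slice (l ++ [s]) (some p.1) (some p.2)) = pvCore l := by
  unfold pvCore
  apply List.map_congr_left
  intro p hp
  obtain ⟨k, h2, hk⟩ := mem_pvIdx (List.of_mem_zip hp).2
  have h1 := (List.of_mem_zip hp).1
  have hj : ∃ j : Nat, p.1 = (j : Int) := by
    rcases List.mem_cons.1 h1 with h0 | hmem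
    · exact ⟨0, by rw [h0]; simp⟩
    · obtain ⟨j, hj, _⟩ := mem_pvIdx ((List.dropLast_sublist _).subset hmem)
      exact ⟨j, hj⟩
  obtain ⟨j, hj⟩ := hj
  rw [hj, h2, slice_append_eq l s j k (by omega)]

-- the loop invariant of A's fold over the filtered list: first component = B's groups,
-- second component = the elements since the last marker (the whole list if no marker)
lemma pvCore_invariant (l : List String) :
    l.foldl
      (fun (st : List (List String) × List String) c =>
        if PySem.Str.isIn "<h3" c then (st.1 ++ [st.2], [c]) else (st.1, st.2 ++ [c]))
      ([], []) =
    (pvCore l, l.drop ((pvIdx l).getLastD 0).toNat) := by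
  induction l using List.reverseRecOn with
  | nil => simp [pvCore, pvIdx, PySem.List.enumerate]
  | append_singleton l s ih =>
    rw [List.foldl_append, ih, List.foldl_cons, List.foldl_nil]
    obtain ⟨k0, hk0, hk0le⟩ := pvIdx_getLastD l
    by_cases hs : PySem.Str.isIn "<h3" s
    · rw [if_pos hs]
      have hidx : pvIdx (l ++ [s]) = pvIdx l ++ [(l.length : Int)] := by
        rw [pvIdx_append, if_pos hs]
      refine Prod.ext ?_ ?_
      · show pvCore l ++ [l.drop ((pvIdx l).getLastD 0).toNat] = pvCore (l ++ [s])
        unfold pvCore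
        rw [hidx, List.dropLast_concat, zip_cons_concat, List.map_append, pvCore_append]
        unfold pvCore
        congr 1
        simp only [List.map_cons, List.map_nil]
        rw [hk0]
        rw [PySem.List.slice_natCast, List.drop_append_of_le_length hk0le,
          List.take_append_of_le_length (by simp),
          List.take_of_length_le (by simp)]
        simp
      · show [s] = (l ++ [s]).drop ((pvIdx (l ++ [s])).getLastD 0).toNat
        rw [hidx, List.getLastD_concat]
        simp
    · rw [if_neg hs]
      have hidx : pvIdx (l ++ [s]) = pvIdx l := by
        rw [pvIdx_append, if_neg hs, List.append_nil]
      refine Prod.ext ?_ ?_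
      · show pvCore l = pvCore (l ++ [s])
        conv_lhs => rw [← pvCore_append l s]
        unfold pvCore
        rw [hidx]
      · show l.drop ((pvIdx l).getLastD 0).toNat ++ [s]
            = (l ++ [s]).drop ((pvIdx (l ++ [s])).getLastD 0).toNat
        rw [hidx, hk0, List.drop_append_of_le_length (by simpa using hk0le)]

lemma alt_eq (cards : List String) :
    cluster_data_alt cards = pvCore (cards.filter (fun c => !PySem.Str.isIn pvHeader c)) := rfl

lemma a_eq (cards : List String) :
    cluster_data cards = pvCore (cards.filter (fun c => !PySem.Str.isIn pvHeader c)) := by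
  unfold cluster_data
  have hstep : (fun (st : List (List String) × List String) c =>
      if PySem.Str.isIn pvHeader c then st
      else
        let st2 := if PySem.Str.isIn "<h3" c then (st.1 ++ [st.2], ([] : List String)) else st
        (st2.1, st2.2 ++ [c]))
      = fun (st : List (List String) × List String) c =>
        if (!PySem.Str.isIn pvHeader c) then
          (if PySem.Str.isIn "<h3" c then (st.1 ++ [st.2], [c]) else (st.1, st.2 ++ [c]))
        else st := by
    funext st c
    by_cases h : PySem.Chars.isIn pvHeader.toList c.toList = true <;>
      by_cases h2 : PySem.Chars.isIn ['<', 'h', '3'] c.toList = true <;> simp [h, h2]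
  rw [hstep, PySem.List.foldl_if_eq_foldl_filter, pvCore_invariant]

-- ===== VERDICT (by name: the statement is the Claim_ definition above) =====
theorem cluster_data_spec : Claim_equal_cluster_data := by
  intro cards _
  unfold Spec_cluster_data
  rw [a_eq, alt_eq]
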